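-- pv_equiv track=rewrite | github.com/BinWu-859/aoc | 2025/02.py | cal_invalid
-- ===== SOURCE A (Python) =====
-- def cal_invalid(a, b, digit):
--     invalid = 0
--     il = []
--     if digit % 2 == 1 or digit < 2:
--         return 0
--     d = 1
--     for i in range(digit//2):
--         d *= 10
--     d += 1
--
--     for i in range(a, b + 1):
--         if i % d == 0:
--             invalid += i
--     return invalid
-- ===== SOURCE B (Python) =====
-- def cal_invalid(a, b, digit):
--     # closed form: sum of multiples of d in [a, b] via arithmetic series
--     if digit % 2 == 1 or digit < 2:
--         return 0
--     d = 10 ** (digit // 2) + 1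
--     lo = -((-a) // d)   # ceil(a / d): smallest k with k*d >= a
--     hi = b // d         # floor(b / d): largest k with k*d <= b
--     if hi < lo:
--         return 0
--     return d * (hi - lo + 1) * (lo + hi) // 2
-- ===== Notes on version B (the rewrite author's own statement) =====
-- stated objective: faster
-- what changed: Replaces the element-by-element scan of range(a, b+1) with the closed-form arithmetic-series sum of the multiples of d between a and b (and computes d with ** instead of a multiplication loop).
import Mathlib
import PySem

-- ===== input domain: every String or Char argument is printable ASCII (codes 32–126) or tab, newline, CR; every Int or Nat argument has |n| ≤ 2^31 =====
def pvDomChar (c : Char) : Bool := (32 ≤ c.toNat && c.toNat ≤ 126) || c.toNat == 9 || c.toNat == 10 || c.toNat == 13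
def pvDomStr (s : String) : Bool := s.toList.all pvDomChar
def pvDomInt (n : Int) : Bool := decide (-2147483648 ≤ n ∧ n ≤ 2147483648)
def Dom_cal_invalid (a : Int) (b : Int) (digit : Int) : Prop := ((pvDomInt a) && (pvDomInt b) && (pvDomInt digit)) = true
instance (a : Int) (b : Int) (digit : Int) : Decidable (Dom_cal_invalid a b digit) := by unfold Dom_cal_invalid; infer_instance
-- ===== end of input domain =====

-- B replaces A's scan of range(a, b+1) by the closed-form arithmetic-series sum of the
-- multiples of d in [a, b] (objective: faster).

-- ===== PORT A =====
def cal_invalid (a : Int) (b : Int) (digit : Int) : Int :=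
  if PySem.Int.mod digit 2 = 1 ∨ digit < 2 then 0
  else
    -- d = 1; for i in range(digit//2): d *= 10; d += 1
    let d : Int := (PySem.List.pyRange 0 (PySem.Int.floordiv digit 2) 1).foldl
               (fun d _ => d * 10) 1 + 1
    -- for i in range(a, b+1): if i % d == 0: invalid += i
    (PySem.List.pyRange a (b + 1) 1).foldl
      (fun invalid i => if PySem.Int.mod i d = 0 then invalid + i else invalid) 0

-- ===== PORT B =====
def cal_invalid_alt (a : Int) (b : Int) (digit : Int) : Int :=
  if PySem.Int.mod digit 2 = 1 ∨ digit < 2 then 0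
  else
    let d : Int := (10 : Int) ^ (PySem.Int.floordiv digit 2).toNat + 1
    let lo : Int := -(PySem.Int.floordiv (-a) d)
    let hi : Int := PySem.Int.floordiv b d
    if hi < lo then 0
    else PySem.Int.floordiv (d * (hi - lo + 1) * (lo + hi)) 2

-- ===== PRECONDITION & SPEC =====
def Spec_cal_invalid (a : Int) (b : Int) (digit : Int) (out : Int) : Prop := out = cal_invalid_alt a b digit
instance (a : Int) (b : Int) (digit : Int) (out : Int) : Decidable (Spec_cal_invalid a b digit out) := by unfold Spec_cal_invalid; infer_instance

-- ===== CLAIM (what is proved, stated in full; the proofs are below) =====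
def Claim_equal_cal_invalid : Prop := ∀ (a : Int) (b : Int) (digit : Int), Dom_cal_invalid a b digit → Spec_cal_invalid a b digit (cal_invalid a b digit)

-- ===== LEMMAS AND PROOFS =====

-- A's d-loop computes 10^(number of iterations)
theorem pow_loop (c : Int) (l : List Int) :
    l.foldl (fun d (_ : Int) => d * 10) c = c * 10 ^ l.length := by
  induction l generalizing c with
  | nil => simp
  | cons x xs ih => simp [List.foldl, ih, pow_succ]; ring

theorem pow_loop_range (n : Int) :
    (PySem.List.pyRange 0 n 1).foldl (fun d (_ : Int) => d * 10) (1 : Int)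
      = (10 : Int) ^ n.toNat := by
  rw [pow_loop, PySem.List.length_pyRange_one]
  simp

-- B's closed form, in ediv form, as a function of d, lo, hi
def pvCF (d lo hi : Int) : Int :=
  if hi < lo then 0 else d * (hi - lo + 1) * (lo + hi) / 2

-- the division by 2 in the closed form is exact
theorem pvCF_exact (d lo hi : Int) (h : ¬ hi < lo) :
    ∃ k, pvCF d lo hi = d * k ∧ (hi - lo + 1) * (lo + hi) = 2 * k := by
  have he : ∃ k, (hi - lo + 1) * (lo + hi) = 2 * k := by
    rcases Int.even_or_odd (hi - lo) with ⟨m, hm⟩ | ⟨m, hm⟩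
    · have hhi : hi = lo + (m + m) := by omega
      exact ⟨(m + m + 1) * (lo + m), by rw [hhi]; ring⟩
    · have hhi : hi = lo + (2 * m + 1) := by omega
      exact ⟨(m + 1) * (2 * lo + 2 * m + 1), by rw [hhi]; ring⟩
  rcases he with ⟨k, hk⟩
  refine ⟨k, ?_, hk⟩
  have hx : d * (hi - lo + 1) * (lo + hi) = 2 * (d * k) := by linear_combination d * hk
  rw [pvCF, if_neg h, hx]
  exact Int.mul_ediv_cancel_left _ (by norm_num)

-- removing the topmost multiple from the closed form
theorem pvCF_step (d lo hi : Int) (hlh : lo ≤ hi) :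
    pvCF d lo hi = pvCF d lo (hi - 1) + d * hi := by
  rcases eq_or_lt_of_le hlh with hle | hlt
  · rcases pvCF_exact d lo hi (by omega) with ⟨k, hk1, hk2⟩
    subst hle
    have hk : k = lo := by linarith [hk2]
    rw [hk1, hk, pvCF, if_pos (by omega)]
    ring
  · rcases pvCF_exact d lo hi (by omega) with ⟨k, hk1, hk2⟩
    rcases pvCF_exact d lo (hi - 1) (by omega) with ⟨k', hk1', hk2'⟩
    have h2k : 2 * k = 2 * (k' + hi) := by linear_combination hk2' - hk2
    have hkk : k = k' + hi := by omega
    rw [hk1, hk1', hkk]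
    ring

-- floor-division bracket for a positive divisor
theorem div_bounds (d : Int) (hd : 0 < d) (x : Int) :
    d * (x / d) ≤ x ∧ x < d * (x / d) + d := by
  have h1 := Int.emod_add_mul_ediv x d
  have h2 := Int.emod_nonneg x (ne_of_gt hd)
  have h3 := Int.emod_lt_of_pos x hd
  omega

-- ceiling bracket: -(-a / d) is the least k with a ≤ k*d
theorem ceil_bounds (d : Int) (hd : 0 < d) (a : Int) :
    d * (-(-a / d) - 1) < a ∧ a ≤ d * (-(-a / d)) := by
  have h1 := Int.emod_add_mul_ediv (-a) d
  have h2 := Int.emod_nonneg (-a) (ne_of_gt hd)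
  have h3 := Int.emod_lt_of_pos (-a) hd
  have e1 : d * (-(-a / d) - 1) = -(d * (-a / d)) - d := by ring
  have e2 : d * (-(-a / d)) = -(d * (-a / d)) := by ring
  omega

-- empty interval: the closed form is 0
theorem pvCF_empty (d : Int) (hd : 0 < d) (a b : Int) (hba : b < a) :
    pvCF d (-(-a / d)) (b / d) = 0 := by
  rw [pvCF, if_pos]
  obtain ⟨h1, h2⟩ := div_bounds d hd b
  obtain ⟨g1, g2⟩ := ceil_bounds d hd a
  by_contra hcon
  have hle : -(-a / d) ≤ b / d := by omega
  have := mul_le_mul_of_nonneg_left hle (le_of_lt hd)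
  omega

theorem ediv_sub_one_of_dvd (d : Int) (hd : 0 < d) (b : Int) (h : b % d = 0) :
    (b - 1) / d = b / d - 1 := by
  have h1 := Int.emod_add_mul_ediv b d
  have hb : b = d * (b / d) := by omega
  have hq : b - 1 = (d - 1) + d * (b / d - 1) := by linear_combination hb
  rw [hq, Int.add_mul_ediv_left _ _ (ne_of_gt hd),
    Int.ediv_eq_zero_of_lt (by omega) (by omega)]
  omega

theorem ediv_sub_one_of_not_dvd (d : Int) (hd : 0 < d) (b : Int) (h : b % d ≠ 0) :
    (b - 1) / d = b / d := by
  have h1 := Int.emod_add_mul_ediv b d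
  have h2 := Int.emod_nonneg b (ne_of_gt hd)
  have h3 := Int.emod_lt_of_pos b hd
  have hq : b - 1 = (b % d - 1) + d * (b / d) := by omega
  rw [hq, Int.add_mul_ediv_left _ _ (ne_of_gt hd),
    Int.ediv_eq_zero_of_lt (by omega) (by omega)]
  omega

-- the key equivalence: A's scan over [a, b] equals B's closed form
theorem scan_eq_cf (d : Int) (hd : 0 < d) (a b : Int) :
    (PySem.List.pyRange a (b + 1) 1).foldl
      (fun invalid i => if i % d = 0 then invalid + i else invalid) (0 : Int)
    = pvCF d (-(-a / d)) (b / d) := by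
  generalize hn : (b + 1 - a).toNat = n
  induction n generalizing b with
  | zero =>
    rw [PySem.List.pyRange_one_eq_nil (by omega), List.foldl_nil,
      pvCF_empty d hd a b (by omega)]
  | succ n ih =>
    have hab : a ≤ b := by omega
    rw [PySem.List.pyRange_one_succ_right (by omega), List.foldl_append,
      List.foldl_cons, List.foldl_nil]
    have hrec := ih (b - 1) (by omega)
    rw [sub_add_cancel] at hrec
    rw [hrec]
    by_cases hdvd : b % d = 0
    · rw [if_pos hdvd, ediv_sub_one_of_dvd d hd b hdvd]
      have h1 := Int.emod_add_mul_ediv b d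
      have hbH : b = d * (b / d) := by omega
      obtain ⟨g1, g2⟩ := ceil_bounds d hd a
      have hLH : -(-a / d) ≤ b / d := by
        by_contra hcon
        have hle : b / d ≤ -(-a / d) - 1 := by omega
        have := mul_le_mul_of_nonneg_left hle (le_of_lt hd)
        omega
      rw [pvCF_step d _ _ hLH]
      omega
    · rw [if_neg hdvd, ediv_sub_one_of_not_dvd d hd b hdvd]

-- ===== VERDICT (by name: the statement is the Claim_ definition above) =====
theorem cal_invalid_spec : Claim_equal_cal_invalid := by
  intro a b digit _
  unfold Spec_cal_invalid cal_invalid cal_invalid_alt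
  by_cases h : PySem.Int.mod digit 2 = 1 ∨ digit < 2
  · rw [if_pos h, if_pos h]
  · rw [if_neg h, if_neg h]
    simp only [pow_loop_range, PySem.Int.floordiv_eq_ediv_of_pos (show (0:Int) < 2 by norm_num)]
    have hd : (0 : Int) < 10 ^ ((digit / 2).toNat) + 1 := by positivity
    simp only [PySem.Int.floordiv_eq_ediv_of_pos hd, PySem.Int.mod_eq_emod_of_pos hd]
    rw [scan_eq_cf _ hd a b, pvCF]
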